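-- pv_equiv track=rewrite | github.com/guptasameer112/CSE350-Network-Security | Assignments/Assignment_1/utils.py | key_mapping
-- ===== SOURCE A (Python) =====
-- def key_mapping(key):
--     """Converts a string key to permutation indices for the transposition cipher, handling repeating letters."""
--     occurrence_dict = {}
--     index_counter = 1
--     permutation_indices = []
--
--     for char in sorted(key):
--         if char not in occurrence_dict:
--             occurrence_dict[char] = 1
--         else:
--             occurrence_dict[char] += 1
--
--         permutation_indices.append(index_counter)
--         index_counter += 1
--
--     char_to_indices = {char: [] for char in key}
--     for index, char in enumerate(sorted(key)):
--         char_to_indices[char].append(permutation_indices[index])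
--
--     final_indices = []
--     for char in key:
--         final_indices.append(char_to_indices[char].pop(0))
--     for i in range(len(final_indices)):
--         final_indices[i] = final_indices[i] - 1
--     return final_indices
-- ===== SOURCE B (Python) =====
-- def key_mapping(key):
--     """Converts a string key to permutation indices for the transposition cipher, handling repeating letters."""
--     # Counting sort over the byte-sized alphabet: rank of each character is
--     # (#characters smaller than it) + (#equal characters appearing earlier).
--     counts = [0] * 256
--     for char in key:
--         counts[ord(char)] += 1
--     start = [0] * 256
--     total = 0
--     for v in range(256):
--         start[v] = total
--         total += counts[v]
--     result = []
--     for char in key: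
--         result.append(start[ord(char)])
--         start[ord(char)] += 1
--     return result
-- ===== Notes on version B (the rewrite author's own statement) =====
-- stated objective: faster
-- what changed: Replaces sort + two dict-of-lists passes + repeated list.pop(0) with a counting sort over the 256-entry byte alphabet: count characters, take prefix sums for starting ranks, then assign each character its next rank in one pass.
import Mathlib
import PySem

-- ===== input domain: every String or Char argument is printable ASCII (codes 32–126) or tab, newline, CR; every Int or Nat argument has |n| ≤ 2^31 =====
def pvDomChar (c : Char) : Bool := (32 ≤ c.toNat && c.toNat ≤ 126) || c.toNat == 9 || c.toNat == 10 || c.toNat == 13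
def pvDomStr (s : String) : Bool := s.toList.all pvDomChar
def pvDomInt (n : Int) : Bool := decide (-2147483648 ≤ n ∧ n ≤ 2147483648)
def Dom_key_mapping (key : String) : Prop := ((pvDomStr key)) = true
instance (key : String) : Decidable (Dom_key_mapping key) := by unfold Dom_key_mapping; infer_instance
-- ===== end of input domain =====

set_option maxRecDepth 4096

-- B replaces sort + dict-of-lists + repeated list.pop(0) with a counting sort over the
-- 256-entry byte alphabet (count, prefix-sum, assign); measurably faster on large inputs.


-- ===== PORT A =====
def key_mapping (key : String) : List Int :=
  let L := key.toList
  let S := PySem.List.sorted L (fun c => c) false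
  -- occurrence_dict / index_counter / permutation_indices loop
  let st1 := S.foldl (fun (st : PySem.Dict Char Int × Int × List Int) char =>
      (if !(st.1.contains char) then st.1.insert char 1
       else st.1.modify char 0 (· + 1),   -- occurrence_dict[char] += 1 (key is present here)
       st.2.1 + 1, st.2.2 ++ [st.2.1])) (PySem.Dict.empty, 1, [])
  let permutation_indices := st1.2.2
  -- char_to_indices = {char: [] for char in key}
  let d0 : PySem.Dict Char (List Int) := L.foldl (fun d char => d.insert char []) PySem.Dict.empty
  -- for index, char in enumerate(sorted(key)): char_to_indices[char].append(permutation_indices[index])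
  -- (char is always a key of the dict and index is always in range, so modify/pyGetD are exact)
  let d1 := (PySem.List.enumerate S).foldl
      (fun d p => d.modify p.2 [] (· ++ [PySem.List.pyGetD permutation_indices p.1 0])) d0
  -- for char in key: final_indices.append(char_to_indices[char].pop(0))  (popped list never empty)
  let st2 := L.foldl (fun (st : PySem.Dict Char (List Int) × List Int) char =>
      (st.1.insert char (st.1.getD char []).tail, st.2 ++ [(st.1.getD char []).headD 0])) (d1, [])
  -- for i in range(len(final_indices)): final_indices[i] = final_indices[i] - 1
  st2.2.map (· - 1)

-- ===== PORT B =====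
def key_mapping_alt (key : String) : List Int :=
  let L := key.toList
  -- counts[ord(char)] += 1
  let counts := L.foldl (fun (cs : List Int) char => cs.set char.toNat (cs.getD char.toNat 0 + 1))
      (List.replicate 256 0)
  -- for v in range(256): start[v] = total; total += counts[v]
  let st := (PySem.List.pyRange 0 256 1).foldl
      (fun (p : List Int × Int) v => (p.1.set v.toNat p.2, p.2 + counts.getD v.toNat 0))
      (List.replicate 256 0, 0)
  -- result.append(start[ord(char)]); start[ord(char)] += 1
  let st2 := L.foldl (fun (p : List Int × List Int) char =>
      (p.1.set char.toNat (p.1.getD char.toNat 0 + 1), p.2 ++ [p.1.getD char.toNat 0])) (st.1, [])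
  st2.2

-- ===== PRECONDITION & SPEC =====
def Spec_key_mapping (key : String) (out : List Int) : Prop := out = key_mapping_alt key
instance (key : String) (out : List Int) : Decidable (Spec_key_mapping key out) := by unfold Spec_key_mapping; infer_instance

-- ===== CLAIM (what is proved, stated in full; the proofs are below) =====
def Claim_equal_key_mapping : Prop := ∀ (key : String), Dom_key_mapping key → Spec_key_mapping key (key_mapping key)

-- ===== LEMMAS AND PROOFS =====

-- The common value both programs compute: walking the key left to right, the entry for a
-- character c is r c plus the number of earlier occurrences of c.
def pvRank (r : Char → Int) : List Char → (Char → Nat) → List Int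
  | [], _ => []
  | c :: t, cnt => (r c + (cnt c : Int)) :: pvRank r t (Function.update cnt c (cnt c + 1))

lemma pvRank_congr (r r' : Char → Int) (h : ∀ c, r c = r' c) :
    ∀ (t : List Char) (cnt : Char → Nat), pvRank r t cnt = pvRank r' t cnt := by
  intro t
  induction t with
  | nil => intro cnt; rfl
  | cons c t ih => intro cnt; simp [pvRank, h, ih]

lemma pvRank_map_sub (r : Char → Int) :
    ∀ (t : List Char) (cnt : Char → Nat),
      (pvRank (fun c => r c + 1) t cnt).map (· - 1) = pvRank r t cnt := by
  intro t
  induction t with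
  | nil => intro cnt; rfl
  | cons c t ih => intro cnt; simp [pvRank, ih]; ring

-- ---- A side ----

lemma loop1 (S : List Char) :
    ∀ (d : PySem.Dict Char Int) (ic : Int) (acc : List Int),
    (S.foldl (fun (st : PySem.Dict Char Int × Int × List Int) char =>
      (if !(st.1.contains char) then st.1.insert char 1
       else st.1.modify char 0 (· + 1),
       st.2.1 + 1, st.2.2 ++ [st.2.1])) (d, ic, acc)).2.2
    = acc ++ (List.range S.length).map (fun (i : Nat) => ic + (i : Int)) := by
  induction S with
  | nil => intro d ic acc; simp
  | cons c t ih =>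
    intro d ic acc
    simp only [List.foldl_cons, ih, List.length_cons]
    rw [List.range_succ_eq_map, List.map_cons, List.map_map, List.append_assoc]
    congr 1
    simp only [List.singleton_append, Nat.cast_zero, add_zero]
    congr 1
    apply List.map_congr_left
    intro i _
    simp only [Function.comp_apply]
    push_cast
    ring

lemma d0_getD (L : List Char) :
    ∀ (d : PySem.Dict Char (List Int)), (∀ c, d.getD c [] = ([] : List Int)) →
    ∀ c, (L.foldl (fun d char => d.insert char []) d).getD c [] = [] := by
  induction L with
  | nil => intro d h c; exact h c
  | cons x t ih =>
    intro d h c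
    simp only [List.foldl_cons]
    apply ih
    intro c'
    by_cases hc : c' = x
    · subst hc; simp [PySem.Dict.getD_insert_self]
    · rw [PySem.Dict.getD_insert_of_ne _ _ _ hc]; exact h c'

lemma d1_getD (pi : List Int) (l : List (Int × Char)) (d : PySem.Dict Char (List Int)) (c : Char) :
    (l.foldl (fun d p => d.modify p.2 [] (· ++ [PySem.List.pyGetD pi p.1 0])) d).getD c []
    = d.getD c [] ++ (l.filter (fun p => p.2 == c)).map (fun p => PySem.List.pyGetD pi p.1 0) := by
  have h1 : (l.foldl (fun d p => d.modify p.2 [] (· ++ [PySem.List.pyGetD pi p.1 0])) d)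
      = ((l.map (fun p => (p.2, PySem.List.pyGetD pi p.1 0))).foldl
          (fun d (q : Char × Int) => d.modify q.1 [] (· ++ [q.2])) d) := by
    rw [List.foldl_map]
  rw [h1, PySem.Dict.getD_foldl_modify_append, List.filter_map, List.map_map]
  rfl

lemma filter_enum_sorted (c : Char) : ∀ (S : List Char) (s : Int), S.Pairwise (· ≤ ·) →
    ((PySem.List.enumerate S s).filter (fun p => p.2 == c)).map (·.1)
    = (List.range (S.count c)).map (fun (j : Nat) => s + (S.countP (fun x => x < c) : Int) + (j : Int)) := by
  intro S
  induction S with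
  | nil => intro s _; simp
  | cons x T ih =>
    intro s hp
    rw [List.pairwise_cons] at hp
    obtain ⟨hx, hT⟩ := hp
    rw [PySem.List.enumerate_cons]
    by_cases hxc : x = c
    · subst hxc
      have h0 : T.countP (fun y => y < x) = 0 := by
        rw [List.countP_eq_zero]
        intro y hy
        simp only [decide_eq_true_eq]
        exact not_lt.mpr (hx y hy)
      have h0' : (x :: T).countP (fun y => y < x) = 0 := by
        simp [h0]
      rw [List.filter_cons]
      simp only [beq_self_eq_true, if_pos, List.map_cons]
      rw [ih (s+1) hT, List.count_cons_self, h0, h0']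
      rw [List.range_succ_eq_map, List.map_cons, List.map_map]
      simp only [Nat.cast_zero, add_zero]
      congr 1
      apply List.map_congr_left
      intro j _
      simp only [Function.comp_apply]
      push_cast
      ring
    · by_cases hlt : x < c
      · rw [List.filter_cons]
        rw [if_neg (by simp [hxc])]
        rw [ih (s+1) hT]
        have hcount : (x :: T).count c = T.count c := by
          rw [List.count_cons_of_ne hxc]
        have hcp : (x :: T).countP (fun y => y < c) = T.countP (fun y => y < c) + 1 := by
          simp [hlt]
        rw [hcount, hcp]
        apply List.map_congr_left
        intro j _
        push_cast
        ring
      · have hcx : c < x := lt_of_le_of_ne (not_lt.mp hlt) (fun h => hxc h.symm)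
        have hnotmem : c ∉ T := by
          intro hm
          exact absurd (hx c hm) (not_le.mpr hcx)
        have hcnt : (x :: T).count c = 0 := by
          rw [List.count_eq_zero]
          simp only [List.mem_cons, not_or]
          exact ⟨fun h => hxc h.symm, hnotmem⟩
        rw [hcnt]
        simp only [List.range_zero, List.map_nil]
        rw [List.map_eq_nil_iff, List.filter_eq_nil_iff]
        intro p hp
        rcases List.mem_cons.mp hp with rfl | hp
        · simp [hxc]
        · rw [PySem.List.mem_enumerate_iff] at hp
          obtain ⟨k, hk, rfl⟩ := hp
          have : T[k] ∈ T := List.getElem_mem hk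
          simp only [beq_iff_eq]
          intro h
          exact hnotmem (h ▸ this)

lemma loopA3 : ∀ (rest : List Char) (d : PySem.Dict Char (List Int)) (acc : List Int)
    (r : Char → Int) (m cnt : Char → Nat),
    (∀ c, d.getD c [] = (List.range (m c - cnt c)).map (fun (j : Nat) => r c + (cnt c : Int) + (j : Int) + 1)) →
    (∀ c, cnt c + rest.count c ≤ m c) →
    (rest.foldl (fun (st : PySem.Dict Char (List Int) × List Int) char =>
      (st.1.insert char (st.1.getD char []).tail, st.2 ++ [(st.1.getD char []).headD 0])) (d, acc)).2
    = acc ++ pvRank (fun c => r c + 1) rest cnt := by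
  intro rest
  induction rest with
  | nil => intro d acc r m cnt _ _; simp [pvRank]
  | cons c t ih =>
    intro d acc r m cnt hd hcnt
    have hpos : cnt c < m c := by
      have : cnt c + (t.count c + 1) ≤ m c := by
        simpa [List.count_cons_self] using hcnt c
      omega
    have hrange : m c - cnt c = (m c - cnt c - 1) + 1 := by omega
    simp only [List.foldl_cons]
    rw [ih _ _ r m (Function.update cnt c (cnt c + 1))]
    · have hv : (d.getD c []).headD 0 = r c + (cnt c : Int) + 1 := by
        rw [hd c, hrange, List.range_succ_eq_map]
        simp
      rw [hv]
      simp only [pvRank, List.append_assoc, List.singleton_append]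
      congr 2
      push_cast
      ring
    · intro x
      by_cases hx : x = c
      · subst hx
        rw [PySem.Dict.getD_insert_self, hd x, hrange, List.range_succ_eq_map]
        simp only [List.map_cons, List.tail_cons, List.map_map]
        first
        | rw [Function.update_self]
        | rw [Function.update_same]
        | simp only [Function.update_self]
        have hmx : m x - (cnt x + 1) = m x - cnt x - 1 := by omega
        rw [hmx]
        apply List.map_congr_left
        intro j _
        simp only [Function.comp_apply]
        push_cast
        ring
      · rw [PySem.Dict.getD_insert_of_ne _ _ _ hx, hd x]
        first
        | rw [Function.update_of_ne hx]
        | rw [Function.update_noteq hx]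
        | simp only [Function.update_of_ne hx]
    · intro x
      by_cases hx : x = c
      · subst hx
        first
        | rw [Function.update_self]
        | rw [Function.update_same]
        | simp only [Function.update_self]
        have : cnt x + (t.count x + 1) ≤ m x := by
          simpa [List.count_cons_self] using hcnt x
        omega
      · first
        | rw [Function.update_of_ne hx]
        | rw [Function.update_noteq hx]
        | simp only [Function.update_of_ne hx]
        have h := hcnt x
        rw [List.count_cons_of_ne (by first | exact hx | exact fun hh => hx hh.symm)] at h
        exact h

lemma A_eq (L : List Char) :
    (let S := PySem.List.sorted L (fun c => c) false
     let st1 := S.foldl (fun (st : PySem.Dict Char Int × Int × List Int) char =>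
        (if !(st.1.contains char) then st.1.insert char 1
         else st.1.modify char 0 (· + 1),
         st.2.1 + 1, st.2.2 ++ [st.2.1])) (PySem.Dict.empty, 1, [])
     let permutation_indices := st1.2.2
     let d0 : PySem.Dict Char (List Int) := L.foldl (fun d char => d.insert char []) PySem.Dict.empty
     let d1 := (PySem.List.enumerate S).foldl
        (fun d p => d.modify p.2 [] (· ++ [PySem.List.pyGetD permutation_indices p.1 0])) d0
     let st2 := L.foldl (fun (st : PySem.Dict Char (List Int) × List Int) char =>
        (st.1.insert char (st.1.getD char []).tail, st.2 ++ [(st.1.getD char []).headD 0])) (d1, [])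
     st2.2.map (· - 1))
    = pvRank (fun c => ((PySem.List.sorted L (fun c => c) false).countP (fun x => x < c) : Int)) L (fun _ => 0) := by
  simp only []
  set S := PySem.List.sorted L (fun c => c) false with hS
  rw [loop1]
  rw [loopA3 _ _ _ (fun c => (S.countP (fun x => x < c) : Int)) (fun c => S.count c) (fun _ => 0) ?hd ?hcnt]
  · rw [List.nil_append, pvRank_map_sub]
  case hd =>
    intro c
    rw [d1_getD, d0_getD L PySem.Dict.empty (fun c => by simp [pysem]) c, List.nil_append]
    have hg : ∀ p ∈ (PySem.List.enumerate S 0).filter (fun p => p.2 == c),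
        PySem.List.pyGetD ([] ++ (List.range S.length).map (fun (i : Nat) => (1 : Int) + (i : Int))) p.1 0 = p.1 + 1 := by
      intro p hp
      obtain ⟨hpe, -⟩ := List.mem_filter.mp hp
      obtain ⟨k, hk, rfl⟩ := (PySem.List.mem_enumerate_iff S 0 p).mp hpe
      simp only [zero_add, List.nil_append]
      rw [PySem.List.pyGetD_natCast, PySem.List.getD_map_range _ _ _ _ hk]
      ring
    rw [List.map_congr_left hg]
    have hm : ((PySem.List.enumerate S 0).filter (fun p => p.2 == c)).map (fun p => p.1 + 1)
        = (((PySem.List.enumerate S 0).filter (fun p => p.2 == c)).map (·.1)).map (· + 1) := by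
      rw [List.map_map]
      rfl
    rw [hm, filter_enum_sorted c S 0 (PySem.List.sorted_pairwise L (fun c => c)), List.map_map,
      Nat.sub_zero]
    apply List.map_congr_left
    intro j _
    simp only [Function.comp_apply]
    push_cast
    ring
  case hcnt =>
    intro c
    show (0:Nat) + List.count c L ≤ List.count c S
    have h := List.Perm.count_eq (PySem.List.sorted_perm L (fun c => c) false) c
    rw [← hS] at h
    omega

-- ---- B side ----

lemma getD_set_int (cs : List Int) (i v : Nat) (x : Int) :
    (cs.set i x).getD v 0 = if v = i ∧ i < cs.length then x else cs.getD v 0 := by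
  rw [List.getD_eq_getElem?_getD, List.getElem?_set]
  by_cases h1 : i = v
  · subst h1
    by_cases h2 : i < cs.length
    · simp [h2]
    · rw [if_pos rfl, if_neg h2, if_neg (by tauto), List.getD_eq_getElem?_getD,
        List.getElem?_eq_none (by omega)]
  · rw [if_neg h1, if_neg (by tauto), List.getD_eq_getElem?_getD]

lemma countP_lt_succ (L : List Char) (n : Nat) :
    L.countP (fun c => c.toNat < n + 1) = L.countP (fun c => c.toNat < n) + L.countP (fun c => c.toNat == n) := by
  induction L with
  | nil => simp
  | cons x t ih =>
    simp only [List.countP_cons, ih, decide_eq_true_eq, beq_iff_eq]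
    split_ifs <;> omega

lemma B1 : ∀ (L : List Char) (cs : List Int), (∀ c ∈ L, c.toNat < 256) → cs.length = 256 →
    (L.foldl (fun (cs : List Int) char => cs.set char.toNat (cs.getD char.toNat 0 + 1)) cs).length = 256 ∧
    ∀ v, (L.foldl (fun (cs : List Int) char => cs.set char.toNat (cs.getD char.toNat 0 + 1)) cs).getD v 0
       = cs.getD v 0 + (L.countP (fun c => c.toNat == v) : Int) := by
  intro L
  induction L with
  | nil => intro cs _ hlen; simpa using hlen
  | cons x t ih =>
    intro cs hmem hlen
    simp only [List.foldl_cons]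
    have hx : x.toNat < 256 := hmem x (by simp)
    have hlen' : (cs.set x.toNat (cs.getD x.toNat 0 + 1)).length = 256 := by
      simp [hlen]
    obtain ⟨ih1, ih2⟩ := ih _ (fun c hc => hmem c (by simp [hc])) hlen'
    refine ⟨ih1, ?_⟩
    intro v
    rw [ih2 v, getD_set_int]
    simp only [List.countP_cons]
    by_cases hv : v = x.toNat
    · subst hv
      rw [if_pos ⟨rfl, by omega⟩]
      simp only [beq_self_eq_true, if_true]
      push_cast
      ring
    · rw [if_neg (by tauto)]
      have hb : (x.toNat == v) = false := by
        simp only [beq_eq_false_iff_ne, ne_eq]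
        exact fun h => hv h.symm
      rw [hb, if_neg (by simp)]
      push_cast
      ring

lemma B2 (L : List Char) (counts : List Int)
    (hc : ∀ v, v < 256 → counts.getD v 0 = (L.countP (fun c => c.toNat == v) : Int)) :
    ∀ (n : Nat), n ≤ 256 →
    ((PySem.List.pyRange 0 (n : Int) 1).foldl
        (fun (p : List Int × Int) v => (p.1.set v.toNat p.2, p.2 + counts.getD v.toNat 0))
        (List.replicate 256 0, 0)).1.length = 256 ∧
    ((PySem.List.pyRange 0 (n : Int) 1).foldl
        (fun (p : List Int × Int) v => (p.1.set v.toNat p.2, p.2 + counts.getD v.toNat 0))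
        (List.replicate 256 0, 0)).2 = (L.countP (fun c => c.toNat < n) : Int) ∧
    ∀ v, v < 256 →
    ((PySem.List.pyRange 0 (n : Int) 1).foldl
        (fun (p : List Int × Int) v => (p.1.set v.toNat p.2, p.2 + counts.getD v.toNat 0))
        (List.replicate 256 0, 0)).1.getD v 0
      = if v < n then (L.countP (fun c => c.toNat < v) : Int) else 0 := by
  intro n
  induction n with
  | zero =>
    intro _
    have h0 : PySem.List.pyRange 0 ((0:Nat):Int) 1 = [] := rfl
    rw [h0]
    refine ⟨by simp, by simp, ?_⟩
    intro v hv
    simp only [List.foldl_nil]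
    rw [List.getD_eq_getElem?_getD, List.getElem?_replicate, if_pos hv]
    simp
  | succ n ih =>
    intro hn
    obtain ⟨ih1, ih2, ih3⟩ := ih (by omega)
    have hcast : (((n + 1 : Nat)) : Int) = (n : Int) + 1 := by push_cast; ring
    rw [hcast, PySem.List.pyRange_one_succ_right (by positivity), List.foldl_append]
    simp only [List.foldl_cons, List.foldl_nil]
    have htn : (n : Int).toNat = n := by omega
    refine ⟨?_, ?_, ?_⟩
    · rw [htn, List.length_set]; exact ih1
    · simp only [htn, ih2, hc n (by omega)]
      rw [countP_lt_succ]
      push_cast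
      ring
    · intro v hv
      rw [htn, getD_set_int, ih1]
      by_cases hvn : v = n
      · subst hvn
        rw [if_pos ⟨rfl, by omega⟩, ih2, if_pos (by omega)]
      · rw [if_neg (by tauto), ih3 v hv]
        by_cases h2 : v < n
        · rw [if_pos h2, if_pos (by omega)]
        · rw [if_neg h2, if_neg (by omega)]

lemma char_toNat_inj {c d : Char} (h : c.toNat = d.toNat) : c = d := by
  first
  | exact Char.eq_of_toNat_eq h
  | exact Char.toNat_inj.mp h
  | (apply Char.ext; first | exact UInt32.toNat_inj.mp h | exact UInt32.eq_of_toNat_eq h)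

lemma B3 : ∀ (rest : List Char) (start acc : List Int) (r : Char → Int) (cnt : Char → Nat),
    start.length = 256 → (∀ c ∈ rest, c.toNat < 256) →
    (∀ c ∈ rest, start.getD c.toNat 0 = r c + (cnt c : Int)) →
    (rest.foldl (fun (p : List Int × List Int) char =>
      (p.1.set char.toNat (p.1.getD char.toNat 0 + 1), p.2 ++ [p.1.getD char.toNat 0])) (start, acc)).2
    = acc ++ pvRank r rest cnt := by
  intro rest
  induction rest with
  | nil => intro start acc r cnt _ _ _; simp [pvRank]
  | cons c t ih =>
    intro start acc r cnt hlen hmem hstart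
    simp only [List.foldl_cons]
    rw [ih _ _ r (Function.update cnt c (cnt c + 1)) (by rw [List.length_set]; exact hlen)
        (fun x hx => hmem x (by simp [hx])) ?hs]
    · rw [hstart c (by simp)]
      simp only [pvRank, List.append_assoc, List.singleton_append]
    case hs =>
      intro x hx
      rw [getD_set_int]
      by_cases hxc : x = c
      · subst hxc
        rw [if_pos ⟨rfl, by rw [hlen]; exact hmem x (by simp)⟩, hstart x (by simp)]
        first
        | rw [Function.update_self]
        | rw [Function.update_same]
        | simp only [Function.update_self]
        push_cast
        ring
      · rw [if_neg (fun h => hxc (char_toNat_inj h.1))]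
        first
        | rw [Function.update_of_ne hxc]
        | rw [Function.update_noteq hxc]
        | simp only [Function.update_of_ne hxc]
        exact hstart x (by simp [hx])

lemma B_eq (L : List Char) (hdom : ∀ c ∈ L, c.toNat < 256) :
    (let counts := L.foldl (fun (cs : List Int) char => cs.set char.toNat (cs.getD char.toNat 0 + 1))
        (List.replicate 256 0)
     let st := (PySem.List.pyRange 0 256 1).foldl
        (fun (p : List Int × Int) v => (p.1.set v.toNat p.2, p.2 + counts.getD v.toNat 0))
        (List.replicate 256 0, 0)
     let st2 := L.foldl (fun (p : List Int × List Int) char =>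
        (p.1.set char.toNat (p.1.getD char.toNat 0 + 1), p.2 ++ [p.1.getD char.toNat 0])) (st.1, [])
     st2.2)
    = pvRank (fun c => (L.countP (fun x => x.toNat < c.toNat) : Int)) L (fun _ => 0) := by
  simp only []
  set counts := L.foldl (fun (cs : List Int) char => cs.set char.toNat (cs.getD char.toNat 0 + 1))
      (List.replicate 256 0) with hcounts
  obtain ⟨hb1, hb2⟩ := B1 L (List.replicate 256 0) hdom (by simp)
  have hc : ∀ v, v < 256 → counts.getD v 0 = (L.countP (fun c => c.toNat == v) : Int) := by
    intro v hv
    rw [hcounts, hb2 v, List.getD_eq_getElem?_getD, List.getElem?_replicate, if_pos hv]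
    simp only [Option.getD_some, zero_add]
  obtain ⟨h1, h2, h3⟩ := B2 L counts hc 256 (le_refl _)
  simp only [Nat.cast_ofNat] at h1 h2 h3
  rw [B3 L _ [] (fun c => (L.countP (fun x => x.toNat < c.toNat) : Int)) (fun _ => 0) h1 hdom ?hst]
  · rw [List.nil_append]
  case hst =>
    intro c hcL
    rw [h3 c.toNat (hdom c hcL), if_pos (hdom c hcL)]
    simp

-- ---- assembly ----

lemma char_lt_iff (c d : Char) : c < d ↔ c.toNat < d.toNat := Iff.rfl

-- ===== VERDICT (by name: the statement is the Claim_ definition above) =====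
theorem key_mapping_spec : Claim_equal_key_mapping := by
  intro key hdom
  show key_mapping key = key_mapping_alt key
  have hdom' : ∀ c ∈ key.toList, c.toNat < 256 := by
    simp only [Dom_key_mapping, pvDomStr, List.all_eq_true, pvDomChar] at hdom
    intro c hc
    have h := hdom c hc
    simp only [Bool.or_eq_true, Bool.and_eq_true, decide_eq_true_eq, beq_iff_eq] at h
    omega
  have hA := A_eq key.toList
  have hB := B_eq key.toList hdom'
  calc key_mapping key
      = pvRank (fun c => ((PySem.List.sorted key.toList (fun c => c) false).countP (fun x => x < c) : Int))
          key.toList (fun _ => 0) := hA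
    _ = pvRank (fun c => (key.toList.countP (fun x => x.toNat < c.toNat) : Int)) key.toList (fun _ => 0) := by
        apply pvRank_congr
        intro c
        rw [List.Perm.countP_eq _ (PySem.List.sorted_perm key.toList (fun c => c) false)]
        all_goals congr 1
        all_goals apply List.countP_congr
        all_goals intro x hxmem
        all_goals simp only [decide_eq_true_eq]
        all_goals first
        | exact char_lt_iff x c
        | rfl
        | simp [char_lt_iff]
    _ = key_mapping_alt key := hB.symm
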